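/- PORTED by tools/port_fixed.py from Prog/Jsmn/S/ParseStr.lean to THE FIXED IMAGE fixed/jsmn_s.bin (same bytes at the same addresses; binFSc). Do not edit: edit the original and port again. -/
/-
  jsmn_s.bin, `jsmn_parse`: `case '\"':` (jsmn.c:361-371; 100438H – 10047BH + the stub 100613H: 22 instructions).
      string_spec   100438H → 100486H | 100325H   r = jsmn_parse_string(…) (by its contract `StrSpec`); r < 0 → return r; count++;
                                                  toksuper != -1 && tokens != NULL → tokens[toksuper].size++
  Four paths after the call: an error code (→ `AtRet`); r = 0 with no superior token; r = 0 in counting mode; r = 0 with `size++` (→ `AtNext`).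
  Model: `Jsmn.body` for `"` = `Jsmn.parseString`, then `Jsmn.bumpSuper`. The S twin of Prog/Jsmn/D/ParseStr.lean.
-/
import Prog.Jsmn.Fixed.Specs
import Prog.Jsmn.Fixed.CodeFS
import Prog.Jsmn.Fixed.S.ParseCallLemmas
namespace X86
namespace J6
namespace FS
open X86.User (CodeAt RegsKept Span FlagsOK Layout toNat_add_ofNat toNat_ofNat_lt' add_ofNat_add)
open Jsmn JsmnFSBytes

set_option maxRecDepth 100000
set_option maxHeartbeats 4000000
set_option linter.unusedSimpArgs false
set_option linter.unusedVariables false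

/-- The switch, for a quote, when the model's scan runs out of fuel. -/
theorem body_str_none {js : List UInt8} {fuel nt : Nat} {s : St} (h : parseString Config.strictLinks js fuel s.p s.toks nt = none) :
    body Config.strictLinks js fuel nt s 0x22 = none := by
  unfold body
  simp [h]

/-- The switch, for a quote: `parseString`, then `return r` or `count++` and `bumpSuper`. -/
theorem body_str_some {js : List UInt8} {fuel nt : Nat} {s : St} {r : Int} {p : Parser} {toks : Option Tokens}
    (h : parseString Config.strictLinks js fuel s.p s.toks nt = some (r, p, toks)) :
    body Config.strictLinks js fuel nt s 0x22 =
      if r < 0 then some (.ret r ⟨p, toks, s.count⟩) else some (.next ⟨p, bumpSuper p toks, i32 (s.count + 1)⟩) := by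
  unfold body
  simp [h]

variable {n : User.Layout}

/-- **`case '\"':`** -/
theorem string_spec (sf : SafeFacts binFSc.cfg) (hstr : StrSpec binFSc n) : StringSpec n := by
  intro c v0 v s ch fuel hok hat hne
  subst hok
  cases hps : parseString Config.strictLinks c.js fuel s.p s.toks c.numTokens with
  | none => exact absurd (body_str_none hps) hne
  | some res =>
  obtain ⟨r, p1, toks1⟩ := res
  have hbody := body_str_some hps
  rw [hbody]
  clear hne
  have hfr := hat.frame
  have hco := hfr.core
  have hen := hco.entry
  have hp := hen.pre
  have hinv := hfr.inv
  have himg := hco.image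
  have htext := hco.text
  have hcode := hco.code
  have hfetch := hp.call.fetch
  have hpa := hco.parser
  have hta := hco.toksArg
  have hnum := hinv.numR
  obtain ⟨hinv1, hsup1, hres1, hnull1⟩ := sf.str c.js fuel s.p s.toks c.numTokens r p1 toks1 hinv hps
  have hW := hp.toksW
  v3_open hat.rip hco.rsp hco.rbp hco.r15 hco.r13 hco.r14 hco.ntok hfr.r12 hp.call hp.env hW
  clear hp_call_rip
  unfold PCtx.tlen at *
  j6f_bin
  v3_walk hcode hfetch [Word.low32_ofNat_of_lt hnum] until [0x100486, 0x100325]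
  have htbeq : toksBytes Config.strictLinks c.numTokens s.toks = toksBytes Config.strictLinks c.numTokens c.toks0 := toksBytes_congr _ _ hco.null
  refine Reach.trans (hstr _ 0x10044e c.pa c.jsA c.tb c.js c.numTokens s.p s.toks fuel r p1 toks1
    ⟨by show CallPre n 0x100000 image_bytes 0x100154 32 _ _; v3_callpre himg hp.call, by v3_regnorm, by v3_regnorm, by v3_regnorm, by v3_regnorm, hnum, hp.jslt,
      by v3_frame htext, by v3_frame hpa, A2.toksArg_frame hta (by v3_memnorm; v3_eqon) (by v3_omega),
      by show Env binFSc n _ 32 c.pa c.jsA c.js.length c.tb (toksBytes Config.strictLinks c.numTokens s.toks)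
         rw [htbeq]; exact A2.env_callee hp.env (by v3_regnorm) (by v3_omega) (Nat.le_refl _)⟩ (by v3_regnorm) hps) ?_
  intro v1 hpost
  v3_open hpost
  have hk := hpost.ret.kept
  v3_viewnorm at hpost_ret_rsp hpost_ret_same
  j6f_bin
  unfold dataWins at hpost_ret_same
  have hsp64 : (v0.reg .rsp - 64).toNat = (v0.reg .rsp).toNat - 64 := by v3_omega
  have hsp96 : 96 ≤ (v0.reg .rsp).toNat := by v3_omega
  rw [hsp64] at hpost_ret_same
  have hcode1 : CodeAt v1.mem 0x1002a9 jsmn_parse_core_bytes := by v3_frame hcodeW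
  clear hcodeW
  have hrax := hpost.rax
  unfold RetInt at hrax
  have hpa1 := hpost.parser
  obtain ⟨hsupraw, hsupr1, hsupr2⟩ := hpost_parser_toksuper
  -- the frame after the call, whatever is done to the token array afterwards
  have hcore : ∀ (v' : User.State) (toks' : Option Tokens), v'.reg .rsp = v1.reg .rsp → v'.reg .rbp = v1.reg .rbp → v'.reg .r15 = v1.reg .r15 →
      v'.reg .r14 = v1.reg .r14 → v'.reg .r13 = v1.reg .r13 →
      SameOutside v1.mem v'.mem [(c.tb.toNat, c.tb.toNat + toksBytes Config.strictLinks c.numTokens s.toks)] →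
      ParserAt v'.mem c.pa p1 → ToksArg Config.strictLinks v'.mem c.tb c.numTokens toks' → (toks' = none ↔ toks1 = none) →
      FrameCore c n v0 v' p1 toks' := by
    intro v' toks' e1 e2 e3 e4 e5 hs hp' ht' hn'
    refine A2.core_step hco (by rw [e1, hpost_ret_rsp, hco_rsp]) (by rw [e2, hk.get .rbp rfl]; v3_regnorm) (by rw [e3, hk.get .r15 rfl]; v3_regnorm)
      (by rw [e4, hk.get .r14 rfl]; v3_regnorm) (by rw [e5, hk.get .r13 rfl]; v3_regnorm) ?_ hp' ht' (hn'.trans hnull1)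
    unfold dataWins PCtx.tlen
    rw [← htbeq]
    have h1 : SameOutside v.mem v1.mem [((v0.reg .rsp).toNat - 96, (v0.reg .rsp).toNat - 56), (c.pa.toNat, c.pa.toNat + 12),
        (c.tb.toNat, c.tb.toNat + toksBytes Config.strictLinks c.numTokens s.toks)] := by v3_same
    refine h1.trans (hs.mono ?_)
    intro a ha
    simp only [outside_cons, outside_nil, and_true] at ha ⊢
    omega
  have hstk : SameOutside v1.mem v1.mem [(c.tb.toNat, c.tb.toNat + toksBytes Config.strictLinks c.numTokens s.toks)] := SameOutside.refl _ _
  by_cases hneg : r < 0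
  · -- an error code: return it
    rw [if_pos hneg]
    obtain ⟨m, hm, hm1, hm2⟩ : ∃ m : Nat, u32 r = m ∧ 2147483648 ≤ m ∧ m < 4294967296 := by
      refine ⟨u32 r, rfl, ?_, u32_lt r⟩
      rcases hres1 with h | h | h | h <;> subst h
      · omega
      all_goals decide
    rw [hm] at hrax
    v3_walk hcode1 hfetch [show ((233 : Nat) == 235) = false by decide, show ((233 : UInt8) == 235) = false by decide, show ((233 : UInt64) == 235) = false by decide] until [0x100486, 0x100325]
    refine Reach.done ⟨by simp, hcore _ toks1 (by v3_regnorm) (by v3_regnorm) (by v3_regnorm) (by v3_regnorm) (by v3_regnorm) (by v3_memnorm; exact hstk)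
      (by v3_memnorm; exact hpa1) (by v3_memnorm; exact hpost_toks) Iff.rfl, ?_⟩
    v3_regnorm
    rw [← hm]
    apply UInt64.toNat_inj.mp
    have := u32_lt r
    v3_omega
  · -- r = 0: count++, tokens[toksuper].size++
    have hr0 : r = 0 := by
      rcases hres1 with h | h | h | h <;> subst h
      · rfl
      all_goals exact absurd (by decide) hneg
    subst hr0
    rw [if_neg hneg]
    rw [if_neg hneg] at hbody
    have hu0 : u32 0 = 0 := by decide
    rw [hu0] at hrax
    by_cases hm1 : p1.toksuper = -1
    · have hsupv : v1.mem.readLE (c.pa + 8) 4 = 4294967295 := by rw [hsupraw, hm1]; rfl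
      clear hsupraw
      v3_walk hcode1 hfetch [show ((233 : Nat) == 235) = false by decide, show ((233 : UInt8) == 235) = false by decide,
        show ((233 : UInt64) == 235) = false by decide] until [0x100486, 0x100325]
      have hbs := A2.bumpSuper_m1 (toks := toks1) hm1
      rw [hbs] at hbody ⊢
      exact Reach.done ⟨by simp, A2.frame_next (fuel := fuel) sf hfr hbody (hcore _ toks1 (by v3_regnorm) (by v3_regnorm) (by v3_regnorm) (by v3_regnorm)
        (by v3_regnorm) (by v3_memnorm; exact hstk) (by v3_memnorm; exact hpa1) (by v3_memnorm; exact hpost_toks) Iff.rfl)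
        (by v3_regnorm; exact A2.r12_inc _)⟩
    · cases toks1 with
      | none =>
        -- counting mode: no token array to update
        have htb0 : c.tb = 0 := hpost_toks
        obtain ⟨m, hsupv, hmne, hmlt⟩ : ∃ m : Nat, v1.mem.readLE (c.pa + 8) 4 = m ∧ m ≠ 4294967295 ∧ m < 4294967296 :=
          ⟨u32 p1.toksuper, hsupraw, by unfold u32; omega, u32_lt _⟩
        clear hsupraw
        v3_walk hcode1 hfetch [show ((233 : Nat) == 235) = false by decide, show ((233 : UInt8) == 235) = false by decide,
          show ((233 : UInt64) == 235) = false by decide] until [0x100486, 0x100325]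
        exact Reach.done ⟨by simp, A2.frame_next (fuel := fuel) sf hfr hbody (hcore _ none (by v3_regnorm) (by v3_regnorm) (by v3_regnorm) (by v3_regnorm)
          (by v3_regnorm) (by v3_memnorm; exact hstk) (by v3_memnorm; exact hpa1) (by v3_memnorm; exact hpost_toks) Iff.rfl)
          (by v3_regnorm; exact A2.r12_inc _)⟩
      | some ts1 =>
        -- tokens[toksuper].size++
        obtain ⟨htb0, hlen1, htoks1⟩ := hpost_toks
        have htinv1 := hinv1.toks ts1 rfl
        have hsuplo := htinv1.superLo
        have hsuphi := htinv1.superHi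
        have hsmall := htinv1.small
        simp only [links_strictLinks, if_true] at hsuphi
        have hnextle := htinv1.toknext
        obtain ⟨j, hj⟩ : ∃ j : Nat, p1.toksuper = j := ⟨p1.toksuper.toNat, by omega⟩
        have hjlt : j < c.numTokens := by omega
        have hsupv : v1.mem.readLE (c.pa + 8) 4 = j := by rw [hsupraw, hj]; unfold u32; omega
        clear hsupraw
        have hsext := Word.sext32_ofNat_of_lt j (by omega)
        have hshl := lea20_ofNat j (by omega)
        have hlow := Word.low32_ofNat_of_lt (n := j) (by omega)
        have htbn : c.tb.toNat ≠ 0 := fun h => htb0 (UInt64.toNat_inj.mp h)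
        obtain ⟨ts, hst⟩ : ∃ ts, s.toks = some ts := by
          cases hst : s.toks with
          | none => exact absurd (hnull1.mpr hst) (by simp)
          | some ts => exact ⟨ts, rfl⟩
        have htb20 : toksBytes Config.strictLinks c.numTokens s.toks = 20 * c.numTokens := by rw [hst]; rfl
        rw [htb20] at htbeq hcore
        rw [← htbeq] at hW_hi hW_stk hW_img hp_env_parserToks hp_env_jsToks
        have hRlo := (hp.env.toksR.resolve_left htb0).lo
        clear hp_env_jsR_lo hp_env_jsR_hi hp_env_jsR_stk hp_env_jsR_img hp_env_parserJs hp_env_jsToks hp_call_retAddr hp_call_retlt hco_ntok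
        have hszlt : v1.mem.readLE (c.tb + UInt64.ofNat (20 * j) + 12) 4 < 4294967296 := User.Mem.readLE4_lt _ _
        v3_walk hcode1 hfetch [hsext, hshl, hlow, show ((233 : Nat) == 235) = false by decide, show ((233 : UInt8) == 235) = false by decide,
          show ((233 : UInt64) == 235) = false by decide] until [0x100486, 0x100325]
        have hbs := A2.bumpSuper_some (ts := ts1) hj
        rw [hbs] at hbody ⊢
        exact Reach.done ⟨by simp, A2.frame_next (fuel := fuel) sf hfr hbody (hcore _ _ (by v3_regnorm) (by v3_regnorm) (by v3_regnorm) (by v3_regnorm)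
          (by v3_regnorm) (by v3_same) (by v3_frame hpa1)
          ⟨htb0, by rw [A2.tokUpd_nat, List.length_set]; exact hlen1, by v3_memnorm; exact A2.bump_tokens htoks1 hlen1 hjlt (by v3_omega) (by v3_omega)⟩ (by simp))
          (by v3_regnorm; exact A2.r12_inc _)⟩

end FS
end J6
end X86
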